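-- pv_equiv track=rewrite | github.com/sreekanthkasani/Demofog | venv/cpabe.py | rhoMap
-- ===== SOURCE A (Python) =====
-- def rhoMap(mono_span_prog, index):
--     i=0
--     for key in mono_span_prog:
--         if i == index:
--             return key
--         else :
--             i = i+1
--     return -1
-- ===== SOURCE B (Python) =====
-- def rhoMap(mono_span_prog, index):
--     table = dict(enumerate(mono_span_prog))
--     return table.get(index, -1)
-- ===== Notes on version B (the rewrite author's own statement) =====
-- stated objective: idiomatic
-- what changed: Replaces the count-as-you-iterate loop with early return by building a position-to-key dict via enumerate and answering with a single table.get(index, -1) lookup.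
-- outside the precondition, e.g. on rhoMap({'a': [1]}, 5): A returns -1, B returns -1; on rhoMap({'a': [1]}, -1): A returns -1, B returns -1
import Mathlib
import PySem

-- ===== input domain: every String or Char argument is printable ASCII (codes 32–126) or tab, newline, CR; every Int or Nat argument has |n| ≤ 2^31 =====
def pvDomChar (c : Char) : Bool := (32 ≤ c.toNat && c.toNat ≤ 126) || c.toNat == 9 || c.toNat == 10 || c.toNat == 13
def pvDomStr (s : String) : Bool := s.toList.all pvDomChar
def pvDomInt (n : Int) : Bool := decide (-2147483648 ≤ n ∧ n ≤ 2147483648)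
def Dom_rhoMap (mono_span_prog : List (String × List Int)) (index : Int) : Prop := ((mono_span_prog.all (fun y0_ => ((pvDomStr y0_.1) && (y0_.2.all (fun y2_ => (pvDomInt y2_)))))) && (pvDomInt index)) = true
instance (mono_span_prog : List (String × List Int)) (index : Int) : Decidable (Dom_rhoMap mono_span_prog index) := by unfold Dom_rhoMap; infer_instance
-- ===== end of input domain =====

-- B replaces A's counting scan by building a position→key dict from enumerate and answering with one table.get lookup (objective: idiomatic).


-- ===== PORT A =====
-- A's for-loop over the dict's keys with a counter i; 'return key' when i == index.
-- On the fall-through A returns the int -1, which is not a String — outside Pre_; the port returns "" there.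
def rhoMapGo (l : List (String × List Int)) (i index : Int) : String :=
  match l with
  | [] => ""  -- Python: return -1 (not a String); excluded by Pre_
  | key :: rest => if i = index then key.1 else rhoMapGo rest (i + 1) index

def rhoMap (mono_span_prog : List (String × List Int)) (index : Int) : String :=
  rhoMapGo mono_span_prog 0 index

-- ===== PORT B =====
-- table = dict(enumerate(mono_span_prog)); return table.get(index, -1)
-- (iterating the dict yields its keys, i.e. mono_span_prog.map Prod.fst here;
--  the miss branch returns the int -1, not a String — outside Pre_; the port returns "" there)
def rhoMap_alt (mono_span_prog : List (String × List Int)) (index : Int) : String :=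
  let table : PySem.Dict Int String :=
    PySem.Dict.ofList (PySem.List.enumerate (mono_span_prog.map Prod.fst))
  (table.get? index).getD ""

-- ===== PRECONDITION & SPEC =====
-- Pre_ excludes out-of-range or negative index, where both Pythons return the int -1, which is not a value of the declared String type.
def Pre_rhoMap (mono_span_prog : List (String × List Int)) (index : Int) : Prop :=
  ∃ i : Fin mono_span_prog.length, index = (i : Int)
instance (mono_span_prog : List (String × List Int)) (index : Int) : Decidable (Pre_rhoMap mono_span_prog index) := by unfold Pre_rhoMap; infer_instance

def pvWitness_rhoMap : (List (String × List Int)) × Int := ([("a", [1]), ("b", [2])], 1)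

def Spec_rhoMap (mono_span_prog : List (String × List Int)) (index : Int) (out : String) : Prop := out = rhoMap_alt mono_span_prog index
instance (mono_span_prog : List (String × List Int)) (index : Int) (out : String) : Decidable (Spec_rhoMap mono_span_prog index out) := by unfold Spec_rhoMap; infer_instance

-- ===== CLAIM (what is proved, stated in full; the proofs are below) =====
def Claim_equal_rhoMap : Prop := ∀ (mono_span_prog : List (String × List Int)) (index : Int), Dom_rhoMap mono_span_prog index → Pre_rhoMap mono_span_prog index → Spec_rhoMap mono_span_prog index (rhoMap mono_span_prog index)

-- ===== LEMMAS AND PROOFS =====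
-- A's counting loop returns the (index - i)-th key when index is reached within l.
theorem rhoMapGo_eq (l : List (String × List Int)) (i index : Int)
    (h1 : i ≤ index) (h2 : index < i + l.length) :
    rhoMapGo l i index = ((l.map Prod.fst)[(index - i).toNat]?).getD "" := by
  induction l generalizing i with
  | nil => simp at h2; omega
  | cons x rest ih =>
    simp only [rhoMapGo]
    by_cases h : i = index
    · subst h
      simp
    · have hlt : i < index := lt_of_le_of_ne h1 h
      rw [ih (i + 1) (by omega) (by simp at h2 ⊢; omega)]
      have : (index - i).toNat = (index - (i + 1)).toNat + 1 := by omega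
      simp [this, h]

-- enumerate's position keys are pairwise distinct.
theorem nodup_fst_enumerate {α : Type} (xs : List α) (s : Int) :
    ((PySem.List.enumerate xs s).map Prod.fst).Nodup := by
  rw [List.nodup_iff_pairwise_ne, List.pairwise_map]
  exact (PySem.List.pairwise_lt_enumerate xs s).imp (fun h => ne_of_lt h)

-- dict(enumerate(xs)) keeps exactly the enumerate pairs as its items.
theorem items_ofList_enumerate {α : Type} (xs : List α) :
    (PySem.Dict.ofList (PySem.List.enumerate xs 0)).items = PySem.List.enumerate xs 0 := by
  have := PySem.Dict.items_foldl_insert_fresh (PySem.List.enumerate xs 0)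
    Prod.fst Prod.snd (PySem.Dict.empty : PySem.Dict Int α)
    (by intro a _; simp [PySem.Dict.contains_empty])
    (nodup_fst_enumerate xs 0)
  simp only [PySem.Dict.ofList, PySem.Dict.update] at this
  simpa using this

theorem rhoMap_spec : Claim_equal_rhoMap := by
  intro l index _ hpre
  obtain ⟨i, rfl⟩ := hpre
  have h0 : (0 : Int) ≤ (i : Int) := by positivity
  have hlen : ((i : Int)) < (l.length : Int) := by exact_mod_cast i.isLt
  unfold Spec_rhoMap rhoMap rhoMap_alt
  rw [rhoMapGo_eq l 0 _ h0 (by omega)]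
  have hilen : (i : Nat) < (l.map Prod.fst).length := by simpa using i.isLt
  have hmem : ((i : Int), (l.map Prod.fst)[(i : Nat)]) ∈
      PySem.List.enumerate (l.map Prod.fst) 0 := by
    rw [PySem.List.mem_enumerate_iff]
    exact ⟨(i : Nat), hilen, by simp⟩
  have hget : (PySem.Dict.ofList (PySem.List.enumerate (l.map Prod.fst))).get? (i : Int)
      = some ((l.map Prod.fst)[(i : Nat)]) := by
    apply PySem.Dict.get?_of_mem_items
    · show _ ∈ (PySem.Dict.ofList (PySem.List.enumerate (l.map Prod.fst) 0)).items
      rw [items_ofList_enumerate]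
      exact hmem
    · exact PySem.Dict.nodup_keys_ofList _
  simp [hget]
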